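-- pv_equiv track=rewrite | github.com/divyavenn/nutramapper_v1 | PySQLConnection.py | input_form
-- ===== SOURCE A (Python) =====
-- import string
--
-- def input_form(str):
--     name = set(string.ascii_lowercase + string.ascii_uppercase + ',' + string.digits + '%' + '(' + ')' + '-' + ' ')
--     id = set(string.digits)
--     if len(str) == 0:
--         return -2
--     elif all(letter in id for letter in str):
--         return 1
--     elif all(letter in name for letter in str):
--         return 0
--     else:
--         return -1
-- ===== SOURCE B (Python) =====
-- import string
--
-- def input_form(str):
--     digits = set(string.digits)
--     name = set(string.ascii_lowercase + string.ascii_uppercase + ',' + string.digits + '%()- ')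
--     def rank(c):
--         return 1 if c in digits else 0 if c in name else -1
--     return min(map(rank, str), default=-2)
-- ===== Notes on version B (the rewrite author's own statement) =====
-- stated objective: simpler
-- what changed: Replaces the two separate all(...) membership scans by a single pass: each character is mapped to a rank (digit=1, name-char=0, other=-1) and the result is the minimum of the ranks with default -2 for the empty string.
import Mathlib
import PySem

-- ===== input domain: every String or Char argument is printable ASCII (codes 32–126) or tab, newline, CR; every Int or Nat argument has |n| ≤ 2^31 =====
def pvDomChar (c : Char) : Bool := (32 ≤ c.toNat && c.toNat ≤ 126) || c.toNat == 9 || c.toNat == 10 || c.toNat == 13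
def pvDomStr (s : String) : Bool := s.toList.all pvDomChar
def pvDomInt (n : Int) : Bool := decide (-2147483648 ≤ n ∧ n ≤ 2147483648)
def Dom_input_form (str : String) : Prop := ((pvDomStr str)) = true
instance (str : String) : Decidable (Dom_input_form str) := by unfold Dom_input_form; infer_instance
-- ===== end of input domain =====

-- B replaces the two all(...) membership scans with one pass taking the minimum of a per-character
-- rank (digit→1, name-char→0, other→-1), with min's default -2 for the empty string (objective: simpler).

-- ===== PORT A =====
def input_form (str : String) : Int :=
  let name := PySem.Set.ofList (("abcdefghijklmnopqrstuvwxyz" ++ "ABCDEFGHIJKLMNOPQRSTUVWXYZ" ++ "," ++ "0123456789" ++ "%" ++ "(" ++ ")" ++ "-" ++ " ").toList)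
  let id := PySem.Set.ofList ("0123456789".toList)
  if PySem.Str.len str == 0 then -2
  else if str.toList.all (fun letter => PySem.Set.contains id letter) then 1
  else if str.toList.all (fun letter => PySem.Set.contains name letter) then 0
  else -1

-- ===== PORT B =====
def pvDigitsB : PySem.Set Char := PySem.Set.ofList ("0123456789".toList)
def pvNameB : PySem.Set Char := PySem.Set.ofList (("abcdefghijklmnopqrstuvwxyz" ++ "ABCDEFGHIJKLMNOPQRSTUVWXYZ" ++ "," ++ "0123456789" ++ "%()- ").toList)

def pvRank (c : Char) : Int :=
  if PySem.Set.contains pvDigitsB c then 1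
  else if PySem.Set.contains pvNameB c then 0
  else -1

-- min(map(rank, str), default=-2): min of a nonempty iterable = fold of min from the first element
def input_form_alt (str : String) : Int :=
  match str.toList with
  | [] => -2
  | c :: rest => rest.foldl (fun a x => min a (pvRank x)) (pvRank c)

-- ===== PRECONDITION & SPEC =====
def Spec_input_form (str : String) (out : Int) : Prop := out = input_form_alt str
instance (str : String) (out : Int) : Decidable (Spec_input_form str out) := by unfold Spec_input_form; infer_instance

-- ===== CLAIM (what is proved, stated in full; the proofs are below) =====
def Claim_equal_input_form : Prop := ∀ (str : String), Dom_input_form str → Spec_input_form str (input_form str)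

-- ===== LEMMAS AND PROOFS =====

def pvCls (t : List Char) : Int :=
  if t.all (fun c => PySem.Set.contains pvDigitsB c) then 1
  else if t.all (fun c => PySem.Set.contains pvNameB c) then 0
  else -1

theorem pvRank_le_one (c : Char) : pvRank c ≤ 1 := by
  unfold pvRank; split_ifs <;> omega

set_option maxRecDepth 4000 in
theorem digit_imp_name (c : Char) (h : PySem.Set.contains pvDigitsB c = true) :
    PySem.Set.contains pvNameB c = true := by
  have h' : c ∈ ['0','1','2','3','4','5','6','7','8','9'] := by
    have e : pvDigitsB = ['0','1','2','3','4','5','6','7','8','9'] := by rfl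
    rw [e] at h
    simpa [PySem.Set.contains] using h
  fin_cases h' <;> rfl

theorem digit_mem_name (c : Char) (h : c ∈ pvDigitsB) : c ∈ pvNameB := by
  have h2 := digit_imp_name c (by simpa [PySem.Set.contains] using h)
  simpa [PySem.Set.contains] using h2

theorem all_digit_imp_name (t : List Char)
    (h : t.all (fun c => PySem.Set.contains pvDigitsB c) = true) :
    t.all (fun c => PySem.Set.contains pvNameB c) = true := by
  rw [List.all_eq_true] at h ⊢
  exact fun c hc => digit_imp_name c (h c hc)

theorem pvCls_cons (h : Char) (t : List Char) :
    pvCls (h :: t) = min (pvRank h) (pvCls t) := by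
  unfold pvCls pvRank
  by_cases hd : PySem.Set.contains pvDigitsB h = true <;>
  by_cases hn : PySem.Set.contains pvNameB h = true <;>
  by_cases td : t.all (fun c => PySem.Set.contains pvDigitsB c) = true <;>
  by_cases tn : t.all (fun c => PySem.Set.contains pvNameB c) = true <;>
    first
      | exact absurd (digit_imp_name h hd) hn
      | exact absurd (all_digit_imp_name t td) tn
      | simp_all
  all_goals split_ifs <;> try omega
  all_goals
    exact absurd (fun x hx => digit_mem_name x (‹∀ x ∈ t, x ∈ pvDigitsB› x hx))
      ‹¬∀ x ∈ t, x ∈ pvNameB›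

theorem foldmin (t : List Char) (a : Int) (ha : a ≤ 1) :
    t.foldl (fun acc x => min acc (pvRank x)) a = min a (pvCls t) := by
  induction t generalizing a with
  | nil => simp [pvCls]; omega
  | cons h t ih =>
    simp only [List.foldl_cons]
    rw [ih (min a (pvRank h)) (by have := pvRank_le_one h; omega)]
    rw [pvCls_cons]
    omega

-- ===== VERDICT (by name: the statement is the Claim_ definition above) =====
theorem input_form_spec : Claim_equal_input_form := by
  intro str _
  unfold Spec_input_form
  cases hL : str.toList with
  | nil =>
    simp [input_form, input_form_alt, hL, PySem.Str.len]
  | cons c rest =>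
    simp only [input_form_alt, hL]
    rw [foldmin rest (pvRank c) (pvRank_le_one c), ← pvCls_cons]
    have hlen : ¬ (PySem.Str.len str == 0) = true := by
      simp [PySem.Str.len, hL]
      omega
    unfold input_form pvCls
    simp only [hlen, if_false, hL, Bool.false_eq_true]
    have hid : PySem.Set.ofList ("0123456789".toList) = pvDigitsB := rfl
    have hname : PySem.Set.ofList (("abcdefghijklmnopqrstuvwxyz" ++ "ABCDEFGHIJKLMNOPQRSTUVWXYZ" ++ "," ++ "0123456789" ++ "%" ++ "(" ++ ")" ++ "-" ++ " ").toList) = pvNameB := by rfl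
    rw [hid, hname]
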